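-- pv_equiv track=rewrite | github.com/1st-award/codetree-TILs | 240110/빙산의 일각 2/the-tip-of-the-iceberg-2.py | solution
-- ===== SOURCE A (Python) =====
-- def solution(N, iceberg_list):
--     max_height = max(iceberg_list)
--     max_iceberg_group = 0
--     for h in range(max_height):
--         iceberg_count = 0
--         include_iceberg = False
--         for iceberg_h in iceberg_list:
--             if iceberg_h - h > 0:
--                 include_iceberg = True
--             elif include_iceberg:
--                 include_iceberg = False
--                 iceberg_count += 1
--         max_iceberg_group = max(max_iceberg_group, iceberg_count)
--     return max_iceberg_group
-- ===== SOURCE B (Python) =====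
-- def solution(N, iceberg_list):
--     # Evaluate the group count only at candidate thresholds (one per adjacent
--     # descent), instead of scanning every height 0..max-1.
--     pairs = list(zip(iceberg_list, iceberg_list[1:]))
--     candidates = set()
--     for x, y in pairs:
--         h = max(y, 0)
--         if h <= x - 1:
--             candidates.add(h)
--     best = 0
--     for h in candidates:
--         best = max(best, sum(1 for x, y in pairs if x > h >= y))
--     return best
-- ===== Notes on version B (the rewrite author's own statement) =====
-- stated objective: faster
-- what changed: Instead of re-scanning the list for every height h in range(max_height) with a run flag, B forms the adjacent pairs once, collects the at-most-N candidate thresholds max(y,0) at descents, and counts crossing pairs only at those thresholds, so the work no longer depends on the height values.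
import Mathlib
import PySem

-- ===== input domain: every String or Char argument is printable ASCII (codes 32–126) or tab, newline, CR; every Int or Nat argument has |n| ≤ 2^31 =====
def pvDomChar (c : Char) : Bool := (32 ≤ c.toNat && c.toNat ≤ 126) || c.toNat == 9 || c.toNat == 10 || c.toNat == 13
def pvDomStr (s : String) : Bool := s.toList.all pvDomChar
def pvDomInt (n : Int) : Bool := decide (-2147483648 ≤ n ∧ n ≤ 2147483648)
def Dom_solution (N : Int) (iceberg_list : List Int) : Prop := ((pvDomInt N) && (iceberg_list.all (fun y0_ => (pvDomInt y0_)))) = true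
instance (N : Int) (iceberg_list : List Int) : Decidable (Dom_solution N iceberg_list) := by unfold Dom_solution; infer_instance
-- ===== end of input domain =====

-- B replaces A's scan over every height 0..max-1 by counting crossing pairs only at
-- the at-most-N candidate thresholds arising at adjacent descents (objective: faster).

-- ===== PORT A =====
-- inner loop body of A: state = (include_iceberg, iceberg_count)
def pvStepA (h : Int) (s : Bool × Int) (x : Int) : Bool × Int :=
  if x - h > 0 then (true, s.2)
  else if s.1 then (false, s.2 + 1)
  else s

def solution (N : Int) (iceberg_list : List Int) : Int :=
  -- max(iceberg_list); raises on [], excluded by Pre_ (getD's default is never used there)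
  let max_height := (PySem.List.max? iceberg_list (fun y => y)).getD 0
  (PySem.List.pyRange 0 max_height 1).foldl
    (fun acc h => max acc (iceberg_list.foldl (pvStepA h) (false, 0)).2) 0

-- ===== PORT B =====
def pvCandStep (s : PySem.Set Int) (p : Int × Int) : PySem.Set Int :=
  if max p.2 0 ≤ p.1 - 1 then PySem.Set.add s (max p.2 0) else s

def solution_alt (N : Int) (iceberg_list : List Int) : Int :=
  let pairs := iceberg_list.zip (PySem.List.slice iceberg_list (some 1) none)
  let candidates := pairs.foldl pvCandStep PySem.Set.empty
  candidates.foldl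
    (fun best h => max best ((pairs.map (fun p => if p.1 > h ∧ h ≥ p.2 then (1 : Int) else 0)).sum)) 0

-- ===== PRECONDITION & SPEC =====
-- Pre_ excludes only the empty list, on which A's max() raises ValueError.
def Pre_solution (N : Int) (iceberg_list : List Int) : Prop := iceberg_list ≠ []
instance (N : Int) (iceberg_list : List Int) : Decidable (Pre_solution N iceberg_list) := by unfold Pre_solution; infer_instance
def pvWitness_solution : Int × List Int := (2, [3, 1])

def Spec_solution (N : Int) (iceberg_list : List Int) (out : Int) : Prop := out = solution_alt N iceberg_list
instance (N : Int) (iceberg_list : List Int) (out : Int) : Decidable (Spec_solution N iceberg_list out) := by unfold Spec_solution; infer_instance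

-- ===== CLAIM (what is proved, stated in full; the proofs are below) =====
def Claim_equal_solution : Prop := ∀ (N : Int) (iceberg_list : List Int), Dom_solution N iceberg_list → Pre_solution N iceberg_list → Spec_solution N iceberg_list (solution N iceberg_list)

-- ===== LEMMAS AND PROOFS =====

-- the adjacent pairs of a list, and the group count at threshold h
def pvPred (h : Int) (p : Int × Int) : Bool := decide (p.1 > h ∧ p.2 ≤ h)

def pvG (l : List Int) (h : Int) : Int := ((l.zip l.tail).countP (pvPred h) : Int)

-- A's inner loop counts >h → ≤h transitions, i.e. descent pairs across h
lemma pv_innerA (h : Int) (t : List Int) : ∀ (x c : Int),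
    (t.foldl (pvStepA h) (decide (x - h > 0), c)).2
      = c + (((x :: t).zip t).countP (pvPred h) : Int) := by
  induction t with
  | nil => intro x c; simp
  | cons a t ih =>
    intro x c
    by_cases h1 : a - h > 0
    · have e : pvStepA h (decide (x - h > 0), c) a = (decide (a - h > 0), c) := by
        simp [pvStepA, show h < a by omega]
      have hp : pvPred h (x, a) = false := by simp [pvPred]; omega
      rw [List.foldl_cons, e, ih a c]
      simp [hp]
    · by_cases h2 : x - h > 0
      · have e : pvStepA h (decide (x - h > 0), c) a = (decide (a - h > 0), c + 1) := by
          simp [pvStepA, show ¬ h < a by omega, show h < x by omega]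
        have hp : pvPred h (x, a) = true := by simp [pvPred]; omega
        rw [List.foldl_cons, e, ih a (c + 1)]
        simp [hp]; ring
      · have e : pvStepA h (decide (x - h > 0), c) a = (decide (a - h > 0), c) := by
          simp [pvStepA, show ¬ h < a by omega, show ¬ h < x by omega]
        have hp : pvPred h (x, a) = false := by simp [pvPred]; omega
        rw [List.foldl_cons, e, ih a c]
        simp [hp]

lemma pv_inner_eq (h : Int) (x : Int) (t : List Int) :
    ((x :: t).foldl (pvStepA h) (false, 0)).2 = pvG (x :: t) h := by
  have e : pvStepA h (false, 0) x = (decide (x - h > 0), 0) := by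
    by_cases hx : h < x <;> simp [pvStepA, hx]
  rw [List.foldl_cons, e, pv_innerA h t x 0]
  simp [pvG]

-- fold-max upper bound
lemma pv_foldMax_le (f : Int → Int) (L : List Int) (M : Int)
    (hb : ∀ x ∈ L, f x ≤ M) : ∀ a, a ≤ M → L.foldl (fun m h => max m (f h)) a ≤ M := by
  induction L with
  | nil => intro a ha; simpa
  | cons b t ih =>
    intro a ha
    simp only [List.foldl_cons]
    exact ih (fun x hx => hb x (by simp [hx])) _
      (by have := hb b (by simp); omega)

-- candidate list of B, as a plain list
def pvCands (l : List Int) : List Int :=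
  (((l.zip l.tail).filter (fun p => decide (max p.2 0 ≤ p.1 - 1))).map (fun p => max p.2 0))

lemma pv_A_char (N x : Int) (t : List Int) :
    solution N (x :: t)
      = (PySem.List.pyRange 0 (t.foldl max x) 1).foldl
          (fun m h => max m (pvG (x :: t) h)) 0 := by
  unfold solution
  rw [PySem.List.max?_id_cons]
  simp only [Option.getD_some]
  apply PySem.List.foldl_congr_mem
  intro acc h _
  rw [pv_inner_eq h x t]

lemma pv_B_char (N : Int) (l : List Int) :
    solution_alt N l
      = (PySem.Set.ofList (pvCands l)).foldl (fun m h => max m (pvG l h)) 0 := by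
  unfold solution_alt
  simp only [PySem.List.slice_from_one]
  have hc : (l.zip l.tail).foldl pvCandStep PySem.Set.empty = PySem.Set.ofList (pvCands l) := by
    show (l.zip l.tail).foldl
        (fun s p => if max p.2 0 ≤ p.1 - 1 then PySem.Set.add s (max p.2 0) else s)
        PySem.Set.empty = _
    rw [PySem.List.foldl_ite_eq_foldl_filter]
    rw [pvCands, PySem.Set.ofList_eq_foldl, List.foldl_map]
    rfl
  rw [hc]
  apply PySem.List.foldl_congr_mem
  intro acc h _
  have hsum : ((l.zip l.tail).map (fun p => if p.1 > h ∧ h ≥ p.2 then (1 : Int) else 0)).sum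
      = ((l.zip l.tail).countP (pvPred h) : Int) := by
    rw [← PySem.List.sum_map_ite_one_zero (pvPred h)]
    apply congrArg
    apply List.map_congr_left
    intro p _
    simp only [pvPred, decide_eq_true_eq, ge_iff_le]
  rw [hsum]
  simp [pvG]

-- every candidate lies in [0, max) and bounds pvG from a member of l
lemma pv_mem_cands (l : List Int) (c : Int) (hc : c ∈ pvCands l) :
    0 ≤ c ∧ ∃ p ∈ l.zip l.tail, c = max p.2 0 ∧ c ≤ p.1 - 1 := by
  unfold pvCands at hc
  rcases List.mem_map.1 hc with ⟨p, hp, rfl⟩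
  rcases List.mem_filter.1 hp with ⟨hpm, hq⟩
  refine ⟨le_max_right _ _, p, hpm, rfl, by simpa using hq⟩

theorem pv_main (N x : Int) (t : List Int) :
    solution N (x :: t) = solution_alt N (x :: t) := by
  rw [pv_A_char, pv_B_char]
  have hlz : (x :: t).tail = t := rfl
  have hG0 : ∀ h, (0 : Int) ≤ pvG (x :: t) h := by
    intro h; unfold pvG; positivity
  -- bounds of each fold
  obtain ⟨hB0, hBmem⟩ :=
    PySem.List.le_foldl_max_int (PySem.Set.ofList (pvCands (x :: t))) (fun h => pvG (x :: t) h) 0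
  obtain ⟨hA0, hAmem⟩ :=
    PySem.List.le_foldl_max_int (PySem.List.pyRange 0 (t.foldl max x) 1) (fun h => pvG (x :: t) h) 0
  apply le_antisymm
  · -- A ≤ B: each range value g h is ≤ g c for the best candidate c ≤ h
    apply pv_foldMax_le _ _ _ _ 0 hB0
    intro h hh
    rw [PySem.List.mem_pyRange_one] at hh
    by_cases hz : ((x :: t).zip t).countP (pvPred h) = 0
    · have : pvG (x :: t) h = 0 := by simp [pvG, hlz, hz]
      omega
    · -- pick the largest candidate value among pairs crossing h
      set S := (((x :: t).zip t).filter (pvPred h)).map (fun p => max p.2 0) with hS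
      have hSne : S ≠ [] := by
        intro hE
        simp only [hS, List.map_eq_nil_iff, List.filter_eq_nil_iff] at hE
        rw [List.countP_eq_zero.2 (by intro p hp; simpa using hE p hp)] at hz
        exact hz rfl
      obtain ⟨m, hm⟩ : ∃ m, PySem.List.max? S (fun y => y) = some m := by
        cases hmx : PySem.List.max? S (fun y => y) with
        | none => exact absurd ((PySem.List.max?_eq_none_iff S (fun y => y)).1 hmx) hSne
        | some m => exact ⟨m, rfl⟩
      have hmmem := PySem.List.max?_mem hm
      have hmmax := PySem.List.max?_isMax hm
      -- m is ≤ h and every pair crossing h also crosses m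
      have hmle : m ≤ h := by
        rcases List.mem_map.1 hmmem with ⟨p, hp, rfl⟩
        rcases List.mem_filter.1 hp with ⟨_, hq⟩
        simp only [pvPred, decide_eq_true_eq] at hq
        omega
      have hmono : ∀ p ∈ (x :: t).zip t, pvPred h p = true → pvPred m p = true := by
        intro p hp hph
        have hmem2 : max p.2 0 ∈ S := List.mem_map.2 ⟨p, List.mem_filter.2 ⟨hp, hph⟩, rfl⟩
        have := hmmax _ hmem2
        simp only [pvPred, decide_eq_true_eq] at hph ⊢
        constructor
        · omega
        · have : p.2 ≤ max p.2 0 := le_max_left _ _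
          omega
      have hGle : pvG (x :: t) h ≤ pvG (x :: t) m := by
        unfold pvG
        exact_mod_cast Int.ofNat_le.2 (List.countP_mono_left hmono)
      -- m is a candidate
      have hmc : m ∈ PySem.Set.ofList (pvCands (x :: t)) := by
        rw [PySem.Set.mem_ofList]
        rcases List.mem_map.1 hmmem with ⟨p, hp, rfl⟩
        rcases List.mem_filter.1 hp with ⟨hpm, hq⟩
        simp only [pvPred, decide_eq_true_eq] at hq
        exact List.mem_map.2 ⟨p, List.mem_filter.2 ⟨hpm, by simp; omega⟩, rfl⟩
      exact le_trans hGle (hBmem m hmc)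
  · -- B ≤ A: every candidate lies in the scanned range
    apply pv_foldMax_le _ _ _ _ 0 hA0
    intro c hcmem
    rw [PySem.Set.mem_ofList] at hcmem
    obtain ⟨hc0, p, hpm, hceq, hcle⟩ := pv_mem_cands (x :: t) c hcmem
    have hp1 : p.1 ∈ x :: t := (List.of_mem_zip hpm).1
    have hp1le : p.1 ≤ t.foldl max x := by
      obtain ⟨hxle, hall⟩ := PySem.List.le_foldl_max t x
      rcases (by simpa using hp1 : p.1 = x ∨ p.1 ∈ t) with h | h
      · omega
      · exact hall _ h
    exact hAmem c (PySem.List.mem_pyRange_one.2 ⟨hc0, by omega⟩)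

-- ===== VERDICT (by name: the statement is the Claim_ definition above) =====
theorem solution_spec : Claim_equal_solution := by
  intro N l _ hpre
  unfold Spec_solution
  cases l with
  | nil => exact absurd rfl hpre
  | cons x t => exact pv_main N x t
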